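-- pv_equiv track=rewrite | github.com/2JooYeon/codingtest-practice | Programmers/64063.py | solution
-- ===== SOURCE A (Python) =====
-- def solution(k, room_number):
--     answer = []
--     room = {}
--     for num in room_number:
--         # 빈 방인 경우
--         if num not in room:
--             answer.append(num)
--             # 방을 배정하고 +1을 부모 방으로 설정
--             room[num] = num + 1
--
--         # 이미 배정된 방인 경우
--         else:
--             # 빈 방을 찾는 동안 방문한 방을 기록
--             visit = [num]
--             # 빈 방이 나올 때까지 확인
--             while num in room:
--                 # 부모 방 방문
--                 num = room[num]
--                 # 부모 방이 비어있다면 방 배정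
--                 if num not in room:
--                     answer.append(num)
--                     # 배정 받은 방의 +1을 부모 방으로 설정
--                     room[num] = num + 1
--                     # 이전에 방문했던 방들도 부모 방 설정
--                     for node in visit:
--                         room[node] = num + 1
--                     break
--                 visit.append(num)
--
--     return answer
-- ===== SOURCE B (Python) =====
-- def solution(k, room_number):
--     answer = []
--     taken = set()
--     for num in room_number:
--         while num in taken:
--             num += 1
--         answer.append(num)
--         taken.add(num)
--     return answer
-- ===== Notes on version B (the rewrite author's own statement) =====
-- stated objective: simpler
-- what changed: Replaced the compressed parent-pointer dictionary (union-find walk with a visit list rewritten after each query) by a plain set of taken rooms with a naive increment scan to the first free room.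
import Mathlib
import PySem

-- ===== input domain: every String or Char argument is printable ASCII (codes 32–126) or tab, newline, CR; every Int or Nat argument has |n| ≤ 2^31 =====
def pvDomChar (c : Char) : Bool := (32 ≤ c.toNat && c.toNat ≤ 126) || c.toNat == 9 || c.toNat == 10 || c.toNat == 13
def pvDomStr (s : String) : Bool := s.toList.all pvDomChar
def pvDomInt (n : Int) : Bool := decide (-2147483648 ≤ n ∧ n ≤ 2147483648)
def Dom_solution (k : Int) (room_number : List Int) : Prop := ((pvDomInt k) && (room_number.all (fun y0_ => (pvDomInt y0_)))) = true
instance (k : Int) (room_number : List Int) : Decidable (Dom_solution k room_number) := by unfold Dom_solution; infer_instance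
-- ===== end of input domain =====

-- B replaces A's compressed parent-pointer dictionary by a plain set of taken rooms
-- with a naive upward scan for the first free room: simpler, same return value.

-- ===== PORT A =====
-- A's 'while num in room' loop; the fuel argument only makes it total (pointers
-- strictly increase inside the key set, so 'room.size + 1' steps always suffice)
def solnAWalk (d : PySem.Dict Int Int) : Nat → Int → List Int → Int × List Int
  | 0, num, visit => (num, visit)
  | fuel+1, num, visit =>
    if d.contains num then
      let num' := d.getD num 0      -- num = room[num]; in range since guarded by 'num in room'
      if d.contains num' = false then (num', visit)
      else solnAWalk d fuel num' (visit ++ [num'])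
    else (num, visit)

def solnAStep (st : List Int × PySem.Dict Int Int) (num : Int) : List Int × PySem.Dict Int Int :=
  let answer := st.1
  let room := st.2
  if room.contains num = false then
    (answer ++ [num], room.insert num (num + 1))
  else
    let r := solnAWalk room (room.size + 1) num [num]
    let room' := room.insert r.1 (r.1 + 1)
    let room'' := r.2.foldl (fun rm node => rm.insert node (r.1 + 1)) room'
    (answer ++ [r.1], room'')

def solution (k : Int) (room_number : List Int) : List Int :=
  (room_number.foldl solnAStep ([], PySem.Dict.empty)).1

-- ===== PORT B =====
-- B's 'while num in taken: num += 1' loop; the fuel argument only makes it total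
def solnBWalk (taken : PySem.Set Int) : Nat → Int → Int
  | 0, num => num
  | fuel+1, num => if PySem.Set.contains taken num then solnBWalk taken fuel (num + 1) else num

def solnBStep (st : List Int × PySem.Set Int) (num : Int) : List Int × PySem.Set Int :=
  let f := solnBWalk st.2 (st.2.length + 1) num
  (st.1 ++ [f], PySem.Set.add st.2 f)

def solution_alt (k : Int) (room_number : List Int) : List Int :=
  (room_number.foldl solnBStep ([], PySem.Set.empty)).1

-- ===== PRECONDITION & SPEC =====
def Spec_solution (k : Int) (room_number : List Int) (out : List Int) : Prop := out = solution_alt k room_number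
instance (k : Int) (room_number : List Int) (out : List Int) : Decidable (Spec_solution k room_number out) := by unfold Spec_solution; infer_instance

-- ===== CLAIM (what is proved, stated in full; the proofs are below) =====
def Claim_equal_solution : Prop := ∀ (k : Int) (room_number : List Int), Dom_solution k room_number → Spec_solution k room_number (solution k room_number)

-- ===== LEMMAS AND PROOFS =====

-- measure lemma: stepping past a member strictly shrinks the tail filter
lemma pvFilterLt {S : List Int} {n m : Int} (hn : n ∈ S) (hlt : n < m) :
    (S.filter (fun x => decide (m ≤ x))).length < (S.filter (fun x => decide (n ≤ x))).length := by
  have mono : ∀ T : List Int,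
      (T.filter (fun x => decide (m ≤ x))).length ≤ (T.filter (fun x => decide (n ≤ x))).length := by
    intro T
    exact (List.monotone_filter_right T (fun a ha => by simp at ha ⊢; omega)).length_le
  induction S with
  | nil => cases hn
  | cons a S ih =>
    simp only [List.filter_cons]
    simp only [decide_eq_true_eq]
    rcases List.mem_cons.mp hn with h | ha
    · subst h
      rw [if_pos le_rfl, if_neg (show ¬ (m ≤ n) by omega)]
      exact Nat.lt_succ_of_le (mono S)
    · have hS := ih ha
      by_cases hma : m ≤ a
      · rw [if_pos hma, if_pos (show n ≤ a by omega)]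
        simpa using Nat.succ_lt_succ hS
      · rw [if_neg hma]
        by_cases hna : n ≤ a
        · rw [if_pos hna]
          simp only [List.length_cons]; omega
        · rw [if_neg hna]
          exact hS

-- first free room ≥ n, given the list S of taken rooms
def ffree (S : List Int) (n : Int) : Int :=
  if h : n ∈ S then ffree S (n + 1) else n
termination_by (S.filter (fun x => decide (n ≤ x))).length
decreasing_by exact pvFilterLt h (by omega)

lemma ffree_of_not_mem {S : List Int} {n : Int} (h : n ∉ S) : ffree S n = n := by
  rw [ffree]; simp [h]

lemma ffree_of_mem {S : List Int} {n : Int} (h : n ∈ S) : ffree S n = ffree S (n + 1) := by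
  rw [ffree]; simp [h]

lemma ffree_not_mem (S : List Int) (n : Int) : ffree S n ∉ S := by
  induction n using ffree.induct S with
  | case1 n h ih => rwa [ffree_of_mem h]
  | case2 n h => rwa [ffree_of_not_mem h]

lemma le_ffree (S : List Int) (n : Int) : n ≤ ffree S n := by
  induction n using ffree.induct S with
  | case1 n h ih => rw [ffree_of_mem h]; omega
  | case2 n h => rw [ffree_of_not_mem h]

lemma ffree_mem_of_lt {S : List Int} {n y : Int} (h1 : n ≤ y) (h2 : y < ffree S n) : y ∈ S := by
  induction n using ffree.induct S with
  | case1 n h ih =>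
    rw [ffree_of_mem h] at h2
    rcases eq_or_lt_of_le h1 with h' | hlt
    · exact h'.symm ▸ h
    · exact ih (by omega) h2
  | case2 n h => rw [ffree_of_not_mem h] at h2; omega

lemma ffree_congr {S T : List Int} (h : ∀ x, x ∈ S ↔ x ∈ T) (n : Int) : ffree S n = ffree T n := by
  induction n using ffree.induct S with
  | case1 n hm ih => rw [ffree_of_mem hm, ffree_of_mem ((h n).mp hm), ih]
  | case2 n hm => rw [ffree_of_not_mem hm, ffree_of_not_mem (fun c => hm ((h n).mpr c))]

lemma ffree_interval {S : List Int} {n m : Int} (hnm : n ≤ m)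
    (h : ∀ y, n ≤ y → y < m → y ∈ S) : ffree S n = ffree S m := by
  have key : ∀ (dd : Nat) (p : Int), (m - p).toNat = dd → p ≤ m →
      (∀ y, p ≤ y → y < m → y ∈ S) → ffree S p = ffree S m := by
    intro dd
    induction dd with
    | zero =>
      intro p hd hpm _
      have hpm' : p = m := by omega
      rw [hpm']
    | succ dd ih =>
      intro p hd hpm h
      have hp : p ∈ S := h p le_rfl (by omega)
      rw [ffree_of_mem hp]
      exact ih (p + 1) (by omega) (by omega) (fun y h1 h2 => h y (by omega) h2)
  exact key (m - n).toNat n rfl hnm h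

-- B's walk computes ffree
lemma solnBWalk_eq (S : PySem.Set Int) : ∀ (fuel : Nat) (n : Int),
    (S.filter (fun x => decide (n ≤ x))).length < fuel → solnBWalk S fuel n = ffree S n := by
  intro fuel
  induction fuel with
  | zero => intro n h; omega
  | succ fuel ih =>
    intro n h
    rw [solnBWalk]
    by_cases hm : n ∈ S
    · rw [if_pos ((PySem.Set.contains_iff S n).mpr hm), ffree_of_mem hm]
      exact ih (n + 1) (by have := pvFilterLt hm (show n < n + 1 by omega); omega)
    · rw [if_neg (fun c => hm ((PySem.Set.contains_iff S n).mp c)), ffree_of_not_mem hm]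

-- the invariant on A's pointer table: each pointer jumps forward over taken rooms only
def InvA (d : PySem.Dict Int Int) : Prop :=
  ∀ x v, d.get? x = some v → x < v ∧ ∀ y, x < y → y < v → d.contains y = true

-- A's walk computes ffree of the key set, and only visits taken rooms below it
lemma solnAWalk_eq {d : PySem.Dict Int Int} (hinv : InvA d) : ∀ (fuel : Nat) (num : Int) (visit : List Int),
    d.contains num = true →
    (d.keys.filter (fun x => decide (num ≤ x))).length < fuel →
    (solnAWalk d fuel num visit).1 = ffree d.keys num ∧
    ∃ extra : List Int, (solnAWalk d fuel num visit).2 = visit ++ extra ∧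
      ∀ x ∈ extra, x ∈ d.keys ∧ num ≤ x ∧ x < ffree d.keys num := by
  intro fuel
  induction fuel with
  | zero => intro num visit _ h; omega
  | succ fuel ih =>
    intro num visit hc hf
    have hmem : num ∈ d.keys := (PySem.Dict.contains_iff_mem_keys d num).mp hc
    obtain ⟨v, hv⟩ : ∃ v, d.get? num = some v := by
      rcases h : d.get? num with _ | v
      · rw [PySem.Dict.contains_eq_isSome_get?, h] at hc; simp at hc
      · exact ⟨v, rfl⟩
    obtain ⟨hlt, hintv⟩ := hinv num v hv
    have hgetD : d.getD num 0 = v := PySem.Dict.getD_of_get?_eq_some d 0 hv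
    have hstep : ffree d.keys num = ffree d.keys v := by
      apply ffree_interval (by omega)
      intro y h1 h2
      rcases eq_or_lt_of_le h1 with h' | h1'
      · exact h' ▸ hmem
      · exact (PySem.Dict.contains_iff_mem_keys d y).mp (hintv y h1' h2)
    rw [solnAWalk, if_pos hc]
    simp only [hgetD]
    by_cases hcv : d.contains v = true
    · rw [if_neg (by simp [hcv])]
      have hvk : v ∈ d.keys := (PySem.Dict.contains_iff_mem_keys d v).mp hcv
      have hfuel : (d.keys.filter (fun x => decide (v ≤ x))).length < fuel := by
        have := pvFilterLt hmem hlt; omega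
      obtain ⟨h1, extra, h2, h3⟩ := ih v (visit ++ [v]) hcv hfuel
      refine ⟨by rw [h1, hstep], v :: extra, by rw [h2]; simp, ?_⟩
      intro x hx
      rcases List.mem_cons.mp hx with h' | hx
      · subst h'
        refine ⟨hvk, by omega, ?_⟩
        rw [hstep, ffree_of_mem hvk]
        have := le_ffree d.keys (x + 1); omega
      · obtain ⟨a1, a2, a3⟩ := h3 x hx
        exact ⟨a1, by omega, by rw [hstep]; exact a3⟩
    · rw [if_pos (by simpa using hcv)]
      have hvnk : v ∉ d.keys := fun c => hcv ((PySem.Dict.contains_iff_mem_keys d v).mpr c)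
      refine ⟨by rw [hstep, ffree_of_not_mem hvnk], [], by simp, by simp⟩

-- lookups after a fold of same-valued inserts
lemma get?_foldl_insert_const (w : Int) : ∀ (l : List Int) (r : PySem.Dict Int Int) (x : Int),
    (l.foldl (fun rm node => rm.insert node w) r).get? x = if x ∈ l then some w else r.get? x := by
  intro l
  induction l with
  | nil => intro r x; simp
  | cons a l ih =>
    intro r x
    simp only [List.foldl_cons]
    rw [ih]
    by_cases hx : x ∈ l
    · simp [hx]
    · rw [if_neg hx, PySem.Dict.get?_insert]
      by_cases hxa : x = a
      · simp [hxa]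
      · simp [hxa, hx]

lemma contains_foldl_insert_const (w : Int) (l : List Int) (r : PySem.Dict Int Int) (x : Int) :
    (l.foldl (fun rm node => rm.insert node w) r).contains x = (decide (x ∈ l) || r.contains x) := by
  rw [PySem.Dict.contains_eq_isSome_get?, get?_foldl_insert_const, PySem.Dict.contains_eq_isSome_get?]
  by_cases hx : x ∈ l <;> simp [hx]

lemma solnAStep_free {d : PySem.Dict Int Int} {num : Int} (ans : List Int)
    (h : d.contains num = false) :
    solnAStep (ans, d) num = (ans ++ [num], d.insert num (num + 1)) := by
  unfold solnAStep
  dsimp only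
  rw [h, if_pos rfl]

lemma solnAStep_occupied {d : PySem.Dict Int Int} {num : Int} (ans : List Int)
    (h : d.contains num = true) :
    solnAStep (ans, d) num =
      (ans ++ [(solnAWalk d (d.size + 1) num [num]).1],
       (solnAWalk d (d.size + 1) num [num]).2.foldl
         (fun rm node => rm.insert node ((solnAWalk d (d.size + 1) num [num]).1 + 1))
         (d.insert (solnAWalk d (d.size + 1) num [num]).1 ((solnAWalk d (d.size + 1) num [num]).1 + 1))) := by
  unfold solnAStep
  dsimp only
  rw [h, if_neg (by simp)]

lemma solnBStep_eq (ans : List Int) (t : PySem.Set Int) (num : Int) :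
    solnBStep (ans, t) num =
      (ans ++ [solnBWalk t (t.length + 1) num], PySem.Set.add t (solnBWalk t (t.length + 1) num)) := rfl

-- the simulation relation between A's table and B's set
def RelAB (d : PySem.Dict Int Int) (t : PySem.Set Int) : Prop :=
  (∀ x, x ∈ d.keys ↔ x ∈ t) ∧ InvA d

lemma step_sim {d : PySem.Dict Int Int} {t : PySem.Set Int} (h : RelAB d t)
    (ans : List Int) (num : Int) :
    (solnAStep (ans, d) num).1 = (solnBStep (ans, t) num).1 ∧
    RelAB (solnAStep (ans, d) num).2 (solnBStep (ans, t) num).2 := by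
  obtain ⟨hmem, hinv⟩ := h
  have hcong : ffree d.keys num = ffree t num := ffree_congr hmem num
  have hBf : solnBWalk t (t.length + 1) num = ffree t num := by
    apply solnBWalk_eq
    have := List.length_filter_le (fun x => decide (num ≤ x)) t
    omega
  by_cases hc : d.contains num = true
  · -- occupied room: A walks the pointer chain, B scans upward
    have hnum : num ∈ d.keys := (PySem.Dict.contains_iff_mem_keys d num).mp hc
    have hfuel : (d.keys.filter (fun x => decide (num ≤ x))).length < d.size + 1 := by
      have h1 := List.length_filter_le (fun x => decide (num ≤ x)) d.keys
      have h2 : d.keys.length = d.size := by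
        simp [PySem.Dict.keys, PySem.Dict.size]
      omega
    obtain ⟨hA1, extra, hA2, hA3⟩ := solnAWalk_eq hinv (d.size + 1) num [num] hc hfuel
    set w := solnAWalk d (d.size + 1) num [num] with hwdef
    set f := ffree d.keys num with hfdef
    have hfnk : f ∉ d.keys := ffree_not_mem d.keys num
    have hnumf : num < f := by
      have := le_ffree d.keys (num + 1)
      rw [hfdef, ffree_of_mem hnum]; omega
    have hvisit : ∀ x ∈ w.2, x ∈ d.keys ∧ num ≤ x ∧ x < f := by
      intro x hx
      rw [hA2] at hx
      rcases List.mem_append.mp hx with hx | hx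
      · simp at hx; subst hx; exact ⟨hnum, le_rfl, hnumf⟩
      · exact hA3 x hx
    rw [solnAStep_occupied ans hc, solnBStep_eq, ← hwdef]
    refine ⟨?_, ?_, ?_⟩
    · simp only [hBf, ← hcong, hA1]
    · -- key sets match
      intro x
      rw [← PySem.Dict.contains_iff_mem_keys, contains_foldl_insert_const,
          PySem.Dict.contains_insert, hBf, ← hcong, PySem.Set.mem_add, hA1]
      constructor
      · intro hx
        simp only [Bool.or_eq_true, decide_eq_true_eq, beq_iff_eq] at hx
        rcases hx with hx | hx | hx
        · exact Or.inl ((hmem x).mp (hvisit x hx).1)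
        · exact Or.inr hx
        · exact Or.inl ((hmem x).mp ((PySem.Dict.contains_iff_mem_keys d x).mp hx))
      · intro hx
        rcases hx with hx | hx
        · simp [(PySem.Dict.contains_iff_mem_keys d x).mpr ((hmem x).mpr hx)]
        · simp [hx]
    · -- InvA preserved
      intro x v hget
      rw [get?_foldl_insert_const] at hget
      by_cases hx : x ∈ w.2
      · rw [if_pos hx] at hget
        obtain ⟨hxk, hxge, hxlt⟩ := hvisit x hx
        have hveq : v = f + 1 := by rw [hA1] at hget; exact (Option.some.inj hget).symm
        refine ⟨by omega, fun y hy1 hy2 => ?_⟩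
        rw [contains_foldl_insert_const, PySem.Dict.contains_insert, hA1]
        by_cases hyf : y = f
        · simp [hyf]
        · have hyk : y ∈ d.keys := ffree_mem_of_lt (show num ≤ y by omega) (by rw [← hfdef]; omega)
          simp [(PySem.Dict.contains_iff_mem_keys d y).mpr hyk]
      · rw [if_neg hx, PySem.Dict.get?_insert, hA1] at hget
        by_cases hxf : x = f
        · rw [if_pos hxf] at hget
          have hveq : v = f + 1 := (Option.some.inj hget).symm
          exact ⟨by omega, fun y hy1 hy2 => by omega⟩
        · rw [if_neg hxf] at hget
          obtain ⟨h1, h2⟩ := hinv x v hget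
          refine ⟨h1, fun y hy1 hy2 => ?_⟩
          rw [contains_foldl_insert_const, PySem.Dict.contains_insert]
          simp [h2 y hy1 hy2]
  · -- free room: both assign num directly
    have hnk : num ∉ d.keys := fun c => hc ((PySem.Dict.contains_iff_mem_keys d num).mpr c)
    have hff : ffree d.keys num = num := ffree_of_not_mem hnk
    rw [solnAStep_free ans (by simpa using hc), solnBStep_eq]
    refine ⟨?_, ?_, ?_⟩
    · rw [hBf, ← hcong, hff]
    · intro x
      rw [PySem.Dict.mem_keys_insert, hBf, ← hcong, hff, PySem.Set.mem_add, hmem x]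
      tauto
    · intro x v hget
      rw [PySem.Dict.get?_insert] at hget
      by_cases hx : x = num
      · rw [if_pos hx] at hget
        have hveq : v = num + 1 := (Option.some.inj hget).symm
        exact ⟨by omega, fun y hy1 hy2 => by omega⟩
      · rw [if_neg hx] at hget
        obtain ⟨h1, h2⟩ := hinv x v hget
        refine ⟨h1, fun y hy1 hy2 => ?_⟩
        rw [PySem.Dict.contains_insert]
        simp [h2 y hy1 hy2]

lemma fold_sim : ∀ (rns : List Int) (ans : List Int) (d : PySem.Dict Int Int) (t : PySem.Set Int),
    RelAB d t → (rns.foldl solnAStep (ans, d)).1 = (rns.foldl solnBStep (ans, t)).1 := by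
  intro rns
  induction rns with
  | nil => intro ans d t _; rfl
  | cons num rns ih =>
    intro ans d t h
    obtain ⟨h1, h2⟩ := step_sim h ans num
    simp only [List.foldl_cons]
    rw [show (solnAStep (ans, d) num) = ((solnAStep (ans, d) num).1, (solnAStep (ans, d) num).2) from rfl,
        show (solnBStep (ans, t) num) = ((solnBStep (ans, t) num).1, (solnBStep (ans, t) num).2) from rfl,
        h1]
    exact ih _ _ _ h2

-- ===== VERDICT (by name: the statement is the Claim_ definition above) =====
theorem solution_spec : Claim_equal_solution := by
  intro k room_number _
  unfold Spec_solution solution solution_alt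
  apply fold_sim
  refine ⟨?_, ?_⟩
  · intro x
    simp [PySem.Dict.keys_empty, PySem.Set.empty]
  · intro x v h
    rw [PySem.Dict.get?_empty] at h
    cases h
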